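-- pv_equiv track=rewrite | github.com/kassaiattila/AI_FLow_Framework | src/aiflow/services/routing_runs/schemas.py | aggregate_outcome
-- ===== SOURCE A (Python) =====
-- from typing import Any, Literal
--
-- ExtractionOutcomeAggregated = Literal[
--     "success",
--     "partial",
--     "failed",
--     "refused_cost",
--     "skipped",
-- ]
--
-- _PER_ATTACHMENT_TO_AGGREGATE: dict[str, ExtractionOutcomeAggregated] = {
--     "succeeded": "success",
--     "failed": "failed",
--     "timed_out": "failed",
--     "refused_cost": "refused_cost",
--     "skipped": "skipped",
-- }
--
-- def aggregate_outcome(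
--     per_attachment_outcomes: list[str],
-- ) -> ExtractionOutcomeAggregated:
--     """Collapse the per-attachment outcomes (SX-2 contract) into the
--     five aggregate values the audit table CHECK constraint accepts.
--
--     Rules:
--
--     * Empty list → ``"skipped"`` (no extraction was run).
--     * Single-attachment emails map 1:1 via the lookup table
--       (``succeeded`` → ``success``, ``failed`` / ``timed_out`` →
--       ``failed``, etc.).
--     * Multi-attachment emails:
--
--       * any ``"succeeded"`` AND any non-success → ``"partial"``
--       * all ``"succeeded"`` → ``"success"``
--       * all ``"refused_cost"`` → ``"refused_cost"``
--       * all ``"skipped"`` → ``"skipped"``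
--       * everything else (including all ``"failed"`` / ``"timed_out"``,
--         or a mix without any success) → ``"failed"``
--
--     Unknown per-attachment outcomes are treated as ``"failed"`` so a
--     contract drift never produces a CHECK-violating insert.
--     """
--     if not per_attachment_outcomes:
--         return "skipped"
--
--     aggregates = [_PER_ATTACHMENT_TO_AGGREGATE.get(o, "failed") for o in per_attachment_outcomes]
--
--     if len(aggregates) == 1:
--         return aggregates[0]
--
--     has_success = any(a == "success" for a in aggregates)
--     all_success = all(a == "success" for a in aggregates)
--     all_refused = all(a == "refused_cost" for a in aggregates)
--     all_skipped = all(a == "skipped" for a in aggregates)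
--
--     if all_success:
--         return "success"
--     if has_success:
--         return "partial"
--     if all_refused:
--         return "refused_cost"
--     if all_skipped:
--         return "skipped"
--     return "failed"
-- ===== SOURCE B (Python) =====
-- _PER_ATTACHMENT_TO_AGGREGATE = {
--     "succeeded": "success",
--     "failed": "failed",
--     "timed_out": "failed",
--     "refused_cost": "refused_cost",
--     "skipped": "skipped",
-- }
--
--
-- def _join(a, b):
--     """Combine two already-aggregated values into one."""
--     if a == b:
--         return a
--     if a in ("success", "partial") or b == "success":
--         return "partial"
--     return "failed"
--
--
-- def aggregate_outcome(per_attachment_outcomes):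
--     acc = None
--     for o in per_attachment_outcomes:
--         v = _PER_ATTACHMENT_TO_AGGREGATE.get(o, "failed")
--         acc = v if acc is None else _join(acc, v)
--     return "skipped" if acc is None else acc
-- ===== Notes on version B (the rewrite author's own statement) =====
-- stated objective: alternative
-- what changed: Replaces A's staged any/all scans and len==1 special case with a single left fold of a binary pairwise join operator (a semilattice-style combine of two aggregate values) over an Option accumulator.
import Mathlib
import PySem

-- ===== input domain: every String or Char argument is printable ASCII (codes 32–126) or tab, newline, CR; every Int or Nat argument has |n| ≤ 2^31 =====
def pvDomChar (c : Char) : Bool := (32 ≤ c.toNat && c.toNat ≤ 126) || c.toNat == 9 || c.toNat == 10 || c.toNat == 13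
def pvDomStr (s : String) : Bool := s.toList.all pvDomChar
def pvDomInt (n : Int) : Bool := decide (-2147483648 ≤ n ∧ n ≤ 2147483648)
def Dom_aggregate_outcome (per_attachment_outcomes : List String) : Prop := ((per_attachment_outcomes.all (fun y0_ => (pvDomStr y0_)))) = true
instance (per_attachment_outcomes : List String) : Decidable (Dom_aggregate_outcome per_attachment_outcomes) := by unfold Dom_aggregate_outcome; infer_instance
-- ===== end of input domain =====

-- B replaces A's staged any/all scans and its len==1 special case with a single left fold
-- of a binary pairwise join of aggregate values over an Option accumulator (alternative).

-- ===== PORT A =====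
def pvTable : PySem.Dict String String :=
  PySem.Dict.ofList [("succeeded", "success"), ("failed", "failed"), ("timed_out", "failed"),
                     ("refused_cost", "refused_cost"), ("skipped", "skipped")]

def aggregate_outcome (per_attachment_outcomes : List String) : String :=
  if per_attachment_outcomes = [] then "skipped"
  else
    let aggregates := per_attachment_outcomes.map (fun o => PySem.Dict.getD pvTable o "failed")
    if aggregates.length = 1 then (PySem.List.pyGet? aggregates 0).getD "failed"
    else
      let has_success := aggregates.any (fun a => a == "success")
      let all_success := aggregates.all (fun a => a == "success")
      let all_refused := aggregates.all (fun a => a == "refused_cost")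
      let all_skipped := aggregates.all (fun a => a == "skipped")
      if all_success then "success"
      else if has_success then "partial"
      else if all_refused then "refused_cost"
      else if all_skipped then "skipped"
      else "failed"

-- ===== PORT B =====
def pvJoin (a b : String) : String :=
  if a == b then a
  else if a == "success" || a == "partial" || b == "success" then "partial"
  else "failed"

def aggregate_outcome_alt (per_attachment_outcomes : List String) : String :=
  let acc := per_attachment_outcomes.foldl
    (fun acc o =>
      let v := PySem.Dict.getD pvTable o "failed"
      match acc with
      | none => some v
      | some a => some (pvJoin a v)) (none : Option String)
  match acc with
  | none => "skipped"
  | some a => a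

-- ===== PRECONDITION & SPEC =====
def Spec_aggregate_outcome (per_attachment_outcomes : List String) (out : String) : Prop := out = aggregate_outcome_alt per_attachment_outcomes
instance (per_attachment_outcomes : List String) (out : String) : Decidable (Spec_aggregate_outcome per_attachment_outcomes out) := by unfold Spec_aggregate_outcome; infer_instance

-- ===== CLAIM (what is proved, stated in full; the proofs are below) =====
def Claim_equal_aggregate_outcome : Prop := ∀ (per_attachment_outcomes : List String), Dom_aggregate_outcome per_attachment_outcomes → Spec_aggregate_outcome per_attachment_outcomes (aggregate_outcome per_attachment_outcomes)

-- ===== LEMMAS AND PROOFS =====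

-- The table lookup produces only the four aggregate values.
lemma lookup_mem (o : String) :
    PySem.Dict.getD pvTable o "failed" = "success" ∨
    PySem.Dict.getD pvTable o "failed" = "failed" ∨
    PySem.Dict.getD pvTable o "failed" = "refused_cost" ∨
    PySem.Dict.getD pvTable o "failed" = "skipped" := by
  have h : pvTable = PySem.Dict.mk [("succeeded", "success"), ("failed", "failed"), ("timed_out", "failed"),
                     ("refused_cost", "refused_cost"), ("skipped", "skipped")] := by decide
  rw [h]
  simp only [PySem.Dict.getD, PySem.Dict.get?_mk_cons]
  split_ifs <;> simp [PySem.Dict.get?]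

-- Canonical form of A's classification, as a function of the running value and the rest.
def pvF (a : String) (L : List String) : String :=
  if a == "success" && L.all (fun x => x == "success") then "success"
  else if a == "success" || a == "partial" || L.any (fun x => x == "success") then "partial"
  else if a == "refused_cost" && L.all (fun x => x == "refused_cost") then "refused_cost"
  else if a == "skipped" && L.all (fun x => x == "skipped") then "skipped"
  else "failed"

-- The fold of the join computes pvF, for accumulators/values in the admitted ranges.
lemma foldl_join_eq (L : List String) : ∀ (a : String),
    a ∈ (["success", "partial", "failed", "refused_cost", "skipped"] : List String) →
    (∀ v ∈ L, v ∈ (["success", "failed", "refused_cost", "skipped"] : List String)) →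
    L.foldl pvJoin a = pvF a L := by
  induction L with
  | nil =>
    intro a ha _
    fin_cases ha <;> rfl
  | cons v L ih =>
    intro a ha hL
    have hv : v ∈ (["success", "failed", "refused_cost", "skipped"] : List String) :=
      hL v (List.mem_cons_self)
    have hL' : ∀ x ∈ L, x ∈ (["success", "failed", "refused_cost", "skipped"] : List String) :=
      fun x hx => hL x (List.mem_cons_of_mem _ hx)
    have hjoin : pvJoin a v ∈ (["success", "partial", "failed", "refused_cost", "skipped"] : List String) := by
      fin_cases ha <;> fin_cases hv <;> decide
    rw [List.foldl_cons, ih (pvJoin a v) hjoin hL']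
    fin_cases ha <;> fin_cases hv <;>
      simp [pvJoin, pvF, List.all_cons, List.any_cons]

-- B's Option-accumulator fold, once seeded, is the plain join fold.
lemma foldl_opt_some (L : List String) : ∀ (a : String),
    L.foldl (fun acc o =>
      match acc with
      | none => some (PySem.Dict.getD pvTable o "failed")
      | some a => some (pvJoin a (PySem.Dict.getD pvTable o "failed"))) (some a)
    = some ((L.map (fun o => PySem.Dict.getD pvTable o "failed")).foldl pvJoin a) := by
  induction L with
  | nil => intro a; rfl
  | cons o L ih => intro a; simpa using ih (pvJoin a (PySem.Dict.getD pvTable o "failed"))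

lemma agg_eq_alt (xs : List String) : aggregate_outcome xs = aggregate_outcome_alt xs := by
  match xs with
  | [] => rfl
  | o :: rest =>
    have h0 := lookup_mem o
    set v0 := PySem.Dict.getD pvTable o "failed" with hv0
    have hv0mem : v0 ∈ (["success", "partial", "failed", "refused_cost", "skipped"] : List String) := by
      rcases h0 with h | h | h | h <;> rw [h] <;> decide
    have hrest : ∀ x ∈ rest.map (fun o => PySem.Dict.getD pvTable o "failed"),
        x ∈ (["success", "failed", "refused_cost", "skipped"] : List String) := by
      intro x hx
      rcases List.mem_map.mp hx with ⟨o', _, rfl⟩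
      rcases lookup_mem o' with h | h | h | h <;> rw [h] <;> decide
    have hB : aggregate_outcome_alt (o :: rest)
        = pvF v0 (rest.map (fun o => PySem.Dict.getD pvTable o "failed")) := by
      unfold aggregate_outcome_alt
      simp only [List.foldl_cons]
      rw [foldl_opt_some, foldl_join_eq _ _ hv0mem hrest]
    rw [hB]
    unfold aggregate_outcome
    rw [if_neg (List.cons_ne_nil o rest)]
    match rest with
    | [] =>
      simp only [List.map_nil, List.map_cons, List.length_cons, List.length_nil]
      rcases h0 with h | h | h | h <;>
        simp [pvF, ← hv0, h, PySem.List.pyGet?, PySem.List.pyIdx?]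
    | r :: rs =>
      simp only [List.map_cons, List.length_cons]
      rw [if_neg (by simp)]
      rcases h0 with h | h | h | h <;>
        simp [pvF, ← hv0, h, List.all_cons, List.any_cons]

-- ===== VERDICT (by name: the statement is the Claim_ definition above) =====
theorem aggregate_outcome_spec : Claim_equal_aggregate_outcome := by
  intro xs _
  exact agg_eq_alt xs
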